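-- pv_equiv track=rewrite | github.com/siyile/leetcode | src/UpTo1400/Problem1301.py | pathsWithMaxScore
-- ===== SOURCE A (Python) =====
-- def pathsWithMaxScore(board):
--     mod = 10 ** 9 + 7
--     n = len(board)
--     dp = [[[0, 0] for _ in range(n+1)] for _ in range(n+1)]
--
--     dp[n-1][n-1] = [0, 1]
--
--     for j in range(n-2, -1, -1):
--         i = n-1
--         while j < n:
--             if board[i][j] == 'X':
--                 j += 1
--                 i -= 1
--                 continue
--             m = max(dp[i+1][j][0], dp[i][j+1][0], dp[i+1][j+1][0])
--             w = 0
--             for x, y in [(i+1,j), (i,j+1), (i+1,j+1)]: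
--                 if dp[x][y][0] == m:
--                     w += dp[x][y][1]
--             dp[i][j] = [int(board[i][j]) + m, w % mod]
--             j += 1
--             i -= 1
--
--     for i in range(n-2, -1, -1):
--         j = 0
--         while i >= 0:
--             if board[i][j] == 'X':
--                 j += 1
--                 i -= 1
--                 continue
--             m = max(dp[i+1][j][0], dp[i][j+1][0], dp[i+1][j+1][0])
--             w = 0
--             for x, y in [(i+1,j), (i,j+1), (i+1,j+1)]:
--                 if dp[x][y][0] == m:
--                     w += dp[x][y][1]
--             dp[i][j] = [(0 if i == 0 and j == 0 else int(board[i][j])) + m, w % mod]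
--             j += 1
--             i -= 1
--
--     return dp[0][0]
-- ===== SOURCE B (Python) =====
-- def pathsWithMaxScore(board):
--     mod = 10 ** 9 + 7
--     n = len(board)
--     memo = {}
--
--     def dp(i, j):
--         if not (0 <= i < n and 0 <= j < n):
--             return (0, 0)
--         if (i, j) in memo:
--             return memo[(i, j)]
--         if i == n - 1 and j == n - 1:
--             res = (0, 1)
--         elif board[i][j] == 'X':
--             res = (0, 0)
--         else:
--             a, b, c = dp(i + 1, j), dp(i, j + 1), dp(i + 1, j + 1)
--             m = max(a[0], b[0], c[0])
--             w = (a[1] if a[0] == m else 0) + (b[1] if b[0] == m else 0) + (c[1] if c[0] == m else 0)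
--             v = 0 if i == 0 and j == 0 else int(board[i][j])
--             res = (v + m, w % mod)
--         memo[(i, j)] = res
--         return res
--
--     r = dp(0, 0)
--     return [r[0], r[1]]
-- ===== Notes on version B (the rewrite author's own statement) =====
-- stated objective: alternative
-- what changed: Replaced A's two imperative anti-diagonal wavefront sweeps over a mutable (n+1)x(n+1) table by a top-down memoized recursion dp(i,j) from the destination (0,0), caching (bestScore, countMod) per cell in a dict.
-- intended difference: On the empty board [] A returns [0, 1] via negative-index wraparound on its padded dp table (an accident of the sentinel setup); B returns [0, 0] (no start cell, no path), which is the intended value for a board with no cells. — e.g. on pathsWithMaxScore([]): A returns [0, 1], B returns [0, 0]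
import Mathlib
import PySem

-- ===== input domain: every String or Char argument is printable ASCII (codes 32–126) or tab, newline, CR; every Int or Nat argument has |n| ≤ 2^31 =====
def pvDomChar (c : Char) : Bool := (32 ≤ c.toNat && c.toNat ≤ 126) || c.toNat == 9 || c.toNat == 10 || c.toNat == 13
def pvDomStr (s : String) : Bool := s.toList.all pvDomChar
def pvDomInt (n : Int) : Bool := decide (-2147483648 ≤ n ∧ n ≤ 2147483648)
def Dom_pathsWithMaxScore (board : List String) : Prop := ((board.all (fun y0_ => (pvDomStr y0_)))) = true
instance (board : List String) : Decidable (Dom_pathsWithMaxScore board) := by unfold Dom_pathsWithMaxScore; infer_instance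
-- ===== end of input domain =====

-- B replaces A's two imperative anti-diagonal sweeps over a mutable (n+1)² table by a
-- top-down memoized recursion dp(i,j) from the destination (alternative decomposition).
-- Loops/recursion are ported with an explicit fuel argument that exactly covers the
-- iteration/depth count (a totality device only; it never changes the computation).

-- ===== PORT A =====
-- board[i][j] as a Char (the getD defaults are never reached on Pre_-admitted inputs)
def pvChA (board : List String) (i j : Int) : Char :=
  (PySem.Str.pyGet? ((PySem.List.pyGet? board i).getD "") j).getD ' '

-- int(board[i][j]) (default never reached on Pre_-admitted inputs)
def pvIntA (board : List String) (i j : Int) : Int :=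
  (PySem.Int.ofChars? [pvChA board i j]).getD 0

-- dp[x][y] = v ; the (n+1)×(n+1) table is a function on coordinates
-- (every Python read/write is in range, so the values are identical)
def pvSetA (dp : Int → Int → Int × Int) (x y : Int) (v : Int × Int) : Int → Int → Int × Int :=
  fun a b => if a = x ∧ b = y then v else dp a b

-- first inner while loop (upward anti-diagonal sweep, condition j < n); fuel = remaining iterations
def pvDiagDown (board : List String) (n : Int) :
    Nat → Int → Int → (Int → Int → Int × Int) → Int → Int → Int × Int
  | 0, _, _, dp => dp
  | fuel+1, j, i, dp =>
    if j < n then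
      if pvChA board i j = 'X' then pvDiagDown board n fuel (j+1) (i-1) dp
      else
        let m := max (dp (i+1) j).1 (max (dp i (j+1)).1 (dp (i+1) (j+1)).1)
        let w := ([(i+1, j), (i, j+1), (i+1, j+1)] : List (Int × Int)).foldl
          (fun w q => if (dp q.1 q.2).1 = m then w + (dp q.1 q.2).2 else w) 0
        pvDiagDown board n fuel (j+1) (i-1)
          (pvSetA dp i j (pvIntA board i j + m, PySem.Int.mod w (10^9+7)))
    else dp

-- second inner while loop (condition i >= 0, contribution 0 at (0,0))
def pvDiagUp (board : List String) (n : Int) :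
    Nat → Int → Int → (Int → Int → Int × Int) → Int → Int → Int × Int
  | 0, _, _, dp => dp
  | fuel+1, j, i, dp =>
    if 0 ≤ i then
      if pvChA board i j = 'X' then pvDiagUp board n fuel (j+1) (i-1) dp
      else
        let m := max (dp (i+1) j).1 (max (dp i (j+1)).1 (dp (i+1) (j+1)).1)
        let w := ([(i+1, j), (i, j+1), (i+1, j+1)] : List (Int × Int)).foldl
          (fun w q => if (dp q.1 q.2).1 = m then w + (dp q.1 q.2).2 else w) 0
        pvDiagUp board n fuel (j+1) (i-1)
          (pvSetA dp i j ((if i = 0 ∧ j = 0 then 0 else pvIntA board i j) + m,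
            PySem.Int.mod w (10^9+7)))
    else dp

-- for j in range(n-2, -1, -1): first family of sweeps
def pvLoop1 (board : List String) (n : Int) :
    Nat → Int → (Int → Int → Int × Int) → Int → Int → Int × Int
  | 0, _, dp => dp
  | fuel+1, j0, dp =>
    if 0 ≤ j0 then pvLoop1 board n fuel (j0-1) (pvDiagDown board n (n-j0).toNat j0 (n-1) dp)
    else dp

-- for i in range(n-2, -1, -1): second family of sweeps
def pvLoop2 (board : List String) (n : Int) :
    Nat → Int → (Int → Int → Int × Int) → Int → Int → Int × Int
  | 0, _, dp => dp
  | fuel+1, i0, dp =>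
    if 0 ≤ i0 then pvLoop2 board n fuel (i0-1) (pvDiagUp board n (i0+1).toNat 0 i0 dp)
    else dp

def pathsWithMaxScore (board : List String) : List Int :=
  let n : Int := board.length
  let dp0 : Int → Int → Int × Int := fun _ _ => (0, 0)
  -- dp[n-1][n-1] = [0,1]; for n = 0 Python's index -1 wraps on the (n+1)-sized table
  let k := PySem.Int.mod (n-1) (n+1)
  let dp1 := pvSetA dp0 k k (0, 1)
  let dp2 := pvLoop1 board n (n-1).toNat (n-2) dp1
  let dp3 := pvLoop2 board n (n-1).toNat (n-2) dp2
  [(dp3 0 0).1, (dp3 0 0).2]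

-- ===== PORT B =====
def pvChB (board : List String) (i j : Int) : Char :=
  (PySem.Str.pyGet? ((PySem.List.pyGet? board i).getD "") j).getD ' '

def pvIntB (board : List String) (i j : Int) : Int :=
  (PySem.Int.ofChars? [pvChB board i j]).getD 0

-- Source B's dp(i,j): same branches in the same order; the memo dict of Source B only avoids
-- recomputation (each cached entry is exactly the value this recursion returns there),
-- so the port is the recursion itself; fuel 2n+1 covers the recursion depth.
def pvDpB (board : List String) : Nat → Int → Int → Int × Int
  | 0, _, _ => (0, 0)
  | fuel+1, i, j =>
    let n : Int := board.length
    if 0 ≤ i ∧ i < n ∧ 0 ≤ j ∧ j < n then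
      if i = n-1 ∧ j = n-1 then (0, 1)
      else if pvChB board i j = 'X' then (0, 0)
      else
        let a := pvDpB board fuel (i+1) j
        let b := pvDpB board fuel i (j+1)
        let c := pvDpB board fuel (i+1) (j+1)
        let m := max a.1 (max b.1 c.1)
        let w := (if a.1 = m then a.2 else 0) + (if b.1 = m then b.2 else 0) +
                 (if c.1 = m then c.2 else 0)
        let v := if i = 0 ∧ j = 0 then 0 else pvIntB board i j
        (v + m, PySem.Int.mod w (10^9+7))
    else (0, 0)

def pathsWithMaxScore_alt (board : List String) : List Int :=
  let r := pvDpB board (2 * board.length + 1) 0 0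
  [r.1, r.2]

-- ===== PRECONDITION & SPEC =====
-- Pre_ excludes exactly the inputs where Python A raises: every processed cell (each (i,j) with
-- i,j < n except the start corner (n-1,n-1)) must exist in its row (else IndexError) and, unless
-- it is 'X' or the destination (0,0), must be a digit (else int() raises ValueError).
def Pre_pathsWithMaxScore (board : List String) : Prop :=
  ∀ i : Nat, i < board.length → ∀ j : Nat, j < board.length →
    ¬(i = board.length - 1 ∧ j = board.length - 1) →
    j < (board.getD i "").toList.length ∧
      (¬(i = 0 ∧ j = 0) →
        ((board.getD i "").toList.getD j ' ' = 'X' ∨ ((board.getD i "").toList.getD j ' ').isDigit))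
instance (board : List String) : Decidable (Pre_pathsWithMaxScore board) := by
  unfold Pre_pathsWithMaxScore; apply Nat.decidableBallLT

def pvWitness_pathsWithMaxScore : List String := ["EX3", "1X5", "78S"]

-- On the empty board [] A returns [0, 1] via negative-index wraparound on its padded dp table
-- (an accident of the sentinel setup); B returns [0, 0] (no start cell, no path), the intended value.
def D_pathsWithMaxScore (board : List String) : Prop := board = []
instance (board : List String) : Decidable (D_pathsWithMaxScore board) := by
  unfold D_pathsWithMaxScore; infer_instance

def Spec_pathsWithMaxScore (board : List String) (out : List Int) : Prop :=
  ¬ D_pathsWithMaxScore board → out = pathsWithMaxScore_alt board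
instance (board : List String) (out : List Int) : Decidable (Spec_pathsWithMaxScore board out) := by
  unfold Spec_pathsWithMaxScore; infer_instance

def pvDiffWitness_pathsWithMaxScore : List String := []
def pvDiffWitnessOut_pathsWithMaxScore : (List Int) × (List Int) := ([0, 1], [0, 0])

-- ===== CLAIM (what is proved, stated in full; the proofs are below) =====
def Claim_unchanged_pathsWithMaxScore : Prop := ∀ (board : List String), Dom_pathsWithMaxScore board → Pre_pathsWithMaxScore board → Spec_pathsWithMaxScore board (pathsWithMaxScore board)
def Claim_changed_pathsWithMaxScore : Prop := Dom_pathsWithMaxScore (pvDiffWitness_pathsWithMaxScore) ∧ Pre_pathsWithMaxScore (pvDiffWitness_pathsWithMaxScore) ∧ D_pathsWithMaxScore (pvDiffWitness_pathsWithMaxScore) ∧ pathsWithMaxScore (pvDiffWitness_pathsWithMaxScore) = pvDiffWitnessOut_pathsWithMaxScore.1 ∧ pathsWithMaxScore_alt (pvDiffWitness_pathsWithMaxScore) = pvDiffWitnessOut_pathsWithMaxScore.2 ∧ pvDiffWitnessOut_pathsWithMaxScore.1 ≠ pvDiffWitnessOut_pathsWithMaxScore.2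
def Claim_exact_pathsWithMaxScore : Prop := ∀ (board : List String), Dom_pathsWithMaxScore board → Pre_pathsWithMaxScore board → D_pathsWithMaxScore board → pathsWithMaxScore board ≠ pathsWithMaxScore_alt board

-- ===== LEMMAS AND PROOFS =====

-- A's and B's cell readers are the same expression
theorem pvChB_eq : pvChB = pvChA := rfl
theorem pvIntB_eq : pvIntB = pvIntA := rfl

-- the result of pvDpB does not depend on the fuel once it exceeds 2n - i - j
theorem pvDpB_fuel (board : List String) :
    ∀ f₁ f₂ : Nat, ∀ i j : Int,
      (2*(board.length:Int) - i - j).toNat < f₁ → (2*(board.length:Int) - i - j).toNat < f₂ →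
      pvDpB board f₁ i j = pvDpB board f₂ i j := by
  intro f₁
  induction f₁ with
  | zero => intro f₂ i j h1 _; omega
  | succ f₁ ih =>
    intro f₂ i j h1 h2
    match f₂ with
    | 0 => omega
    | f₂ + 1 =>
      simp only [pvDpB]
      by_cases hb : 0 ≤ i ∧ i < (board.length:Int) ∧ 0 ≤ j ∧ j < (board.length:Int)
      · rw [if_pos hb, if_pos hb]
        obtain ⟨hb1, hb2, hb3, hb4⟩ := hb
        by_cases hc : i = (board.length:Int)-1 ∧ j = (board.length:Int)-1
        · rw [if_pos hc, if_pos hc]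
        · rw [if_neg hc, if_neg hc]
          by_cases hx : pvChB board i j = 'X'
          · rw [if_pos hx, if_pos hx]
          · rw [if_neg hx, if_neg hx]
            rw [ih f₂ (i+1) j (by omega) (by omega), ih f₂ i (j+1) (by omega) (by omega),
              ih f₂ (i+1) (j+1) (by omega) (by omega)]
      · rw [if_neg hb, if_neg hb]

-- B's dp as a function of the cell alone (fuel saturated)
def pvG (board : List String) (i j : Int) : Int × Int :=
  pvDpB board ((2*(board.length:Int) - i - j).toNat + 1) i j

theorem pvG_out (board : List String) (i j : Int)
    (h : ¬(0 ≤ i ∧ i < (board.length : Int) ∧ 0 ≤ j ∧ j < (board.length : Int))) :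
    pvG board i j = (0, 0) := by
  unfold pvG
  simp only [pvDpB]
  rw [if_neg h]

theorem pvG_corner (board : List String) (h : 1 ≤ (board.length : Int)) :
    pvG board ((board.length : Int)-1) ((board.length : Int)-1) = (0, 1) := by
  have hh : (0:Int) ≤ (board.length:Int)-1 ∧ (board.length:Int)-1 < (board.length:Int) ∧
      (0:Int) ≤ (board.length:Int)-1 ∧ (board.length:Int)-1 < (board.length:Int) := by omega
  unfold pvG
  simp only [pvDpB]
  rw [if_pos hh]
  simp

theorem pvG_X (board : List String) (i j : Int)
    (h : 0 ≤ i ∧ i < (board.length : Int) ∧ 0 ≤ j ∧ j < (board.length : Int))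
    (hc : ¬(i = (board.length : Int)-1 ∧ j = (board.length : Int)-1))
    (hx : pvChA board i j = 'X') :
    pvG board i j = (0, 0) := by
  unfold pvG
  simp only [pvDpB]
  rw [if_pos h, if_neg hc, if_pos (by rw [pvChB_eq]; exact hx)]

theorem pvG_step (board : List String) (i j : Int)
    (h : 0 ≤ i ∧ i < (board.length : Int) ∧ 0 ≤ j ∧ j < (board.length : Int))
    (hc : ¬(i = (board.length : Int)-1 ∧ j = (board.length : Int)-1))
    (hx : ¬pvChA board i j = 'X') :
    pvG board i j =
      ((if i = 0 ∧ j = 0 then 0 else pvIntA board i j) +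
        max (pvG board (i+1) j).1 (max (pvG board i (j+1)).1 (pvG board (i+1) (j+1)).1),
       PySem.Int.mod
         ((if (pvG board (i+1) j).1 =
              max (pvG board (i+1) j).1 (max (pvG board i (j+1)).1 (pvG board (i+1) (j+1)).1)
           then (pvG board (i+1) j).2 else 0) +
          (if (pvG board i (j+1)).1 =
              max (pvG board (i+1) j).1 (max (pvG board i (j+1)).1 (pvG board (i+1) (j+1)).1)
           then (pvG board i (j+1)).2 else 0) +
          (if (pvG board (i+1) (j+1)).1 =
              max (pvG board (i+1) j).1 (max (pvG board i (j+1)).1 (pvG board (i+1) (j+1)).1)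
           then (pvG board (i+1) (j+1)).2 else 0)) (10^9+7)) := by
  obtain ⟨h1, h2, h3, h4⟩ := h
  conv_lhs => unfold pvG
  conv_lhs => simp only [pvDpB]
  rw [if_pos ⟨h1, h2, h3, h4⟩, if_neg hc, if_neg (by rw [pvChB_eq]; exact hx), pvIntB_eq]
  have e1 : pvDpB board ((2*(board.length:Int) - i - j).toNat) (i+1) j = pvG board (i+1) j :=
    pvDpB_fuel board _ _ (i+1) j (by omega) (by omega)
  have e2 : pvDpB board ((2*(board.length:Int) - i - j).toNat) i (j+1) = pvG board i (j+1) :=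
    pvDpB_fuel board _ _ i (j+1) (by omega) (by omega)
  have e3 : pvDpB board ((2*(board.length:Int) - i - j).toNat) (i+1) (j+1) = pvG board (i+1) (j+1) :=
    pvDpB_fuel board _ _ (i+1) (j+1) (by omega) (by omega)
  rw [e1, e2, e3]

-- A's inner for-loop accumulating w over the literal pair list, evaluated
theorem pvFoldW (f : Int → Int → Int × Int) (m i j : Int) :
    ([(i+1, j), (i, j+1), (i+1, j+1)] : List (Int × Int)).foldl
      (fun w q => if (f q.1 q.2).1 = m then w + (f q.1 q.2).2 else w) 0 =
    (if (f (i+1) j).1 = m then (f (i+1) j).2 else 0) +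
    (if (f i (j+1)).1 = m then (f i (j+1)).2 else 0) +
    (if (f (i+1) (j+1)).1 = m then (f (i+1) (j+1)).2 else 0) := by
  simp only [List.foldl]
  split_ifs <;> ring

-- the "initial contents" of A's table: (0,1) at the corner, (0,0) elsewhere
def pvInit (board : List String) (x y : Int) : Int × Int :=
  if x = (board.length : Int)-1 ∧ y = (board.length : Int)-1 then (0, 1) else (0, 0)

-- between-sweeps invariant: diagonals with sum ≥ s hold B's dp values, the rest still initial
def pvP (board : List String) (dp : Int → Int → Int × Int) (s : Int) : Prop :=
  (∀ x y, x + y ≥ s → dp x y = pvG board x y) ∧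
  (∀ x y, x + y < s → dp x y = pvInit board x y)

-- within-sweep invariant on the diagonal of sum s: its columns < j are done
def pvQ (board : List String) (dp : Int → Int → Int × Int) (s j : Int) : Prop :=
  (∀ x y, (x + y > s ∨ (x + y = s ∧ y < j)) → dp x y = pvG board x y) ∧
  (∀ x y, (x + y < s ∨ (x + y = s ∧ j ≤ y)) → dp x y = pvInit board x y)

theorem pvInit_eq_G_out (board : List String) (x y : Int)
    (h : ¬(0 ≤ x ∧ x < (board.length : Int) ∧ 0 ≤ y ∧ y < (board.length : Int)))
    (hc : ¬(x = (board.length : Int)-1 ∧ y = (board.length : Int)-1)) :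
    pvInit board x y = pvG board x y := by
  rw [pvG_out board x y h, pvInit, if_neg hc]

-- writing the final value of the current cell advances the within-sweep invariant
theorem pvQ_write (board : List String) (dp : Int → Int → Int × Int) (s j i : Int)
    (hij : i + j = s) (hQ : pvQ board dp s j) :
    pvQ board (pvSetA dp i j (pvG board i j)) s (j+1) := by
  constructor
  · intro x y hc
    by_cases hxy : x = i ∧ y = j
    · obtain ⟨hx, hy⟩ := hxy; subst hx; subst hy
      simp [pvSetA]
    · rw [pvSetA, if_neg hxy]
      rcases hc with hgt | ⟨hs, hlt⟩
      · exact hQ.1 x y (Or.inl hgt)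
      · refine hQ.1 x y (Or.inr ⟨hs, ?_⟩)
        rcases lt_or_eq_of_le (Int.lt_add_one_iff.mp hlt) with h' | h'
        · exact h'
        · exact absurd ⟨by omega, h'⟩ hxy
  · intro x y hc
    have hxy : ¬(x = i ∧ y = j) := by
      rcases hc with hlt | ⟨hs, hge⟩ <;> rintro ⟨rfl, rfl⟩ <;> omega
    rw [pvSetA, if_neg hxy]
    rcases hc with hlt | ⟨hs, hge⟩
    · exact hQ.2 x y (Or.inl hlt)
    · exact hQ.2 x y (Or.inr ⟨hs, by omega⟩)

-- skipping a cell whose final value is its initial value also advances it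
theorem pvQ_skip (board : List String) (dp : Int → Int → Int × Int) (s j i : Int)
    (hij : i + j = s) (hG0 : pvG board i j = pvInit board i j) (hQ : pvQ board dp s j) :
    pvQ board dp s (j+1) := by
  constructor
  · intro x y hc
    rcases hc with hgt | ⟨hs, hlt⟩
    · exact hQ.1 x y (Or.inl hgt)
    · rcases lt_or_eq_of_le (Int.lt_add_one_iff.mp hlt) with h' | h'
      · exact hQ.1 x y (Or.inr ⟨hs, h'⟩)
      · have hx : x = i := by omega
        rw [hx, h', hQ.2 i j (Or.inr ⟨by omega, le_refl j⟩), hG0]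
  · intro x y hc
    rcases hc with hlt | ⟨hs, hge⟩
    · exact hQ.2 x y (Or.inl hlt)
    · exact hQ.2 x y (Or.inr ⟨hs, by omega⟩)

theorem pvDiagDown_spec (board : List String) (n : Int) (hn : n = (board.length : Int))
    (s : Int) (hs0 : n - 1 ≤ s) (hs1 : s ≤ 2*n - 3) :
    ∀ (f : Nat) (j i : Int) dp, f = (n - j).toNat → i + j = s → s - (n-1) ≤ j → pvQ board dp s j →
      pvQ board (pvDiagDown board n f j i dp) s n := by
  subst hn
  intro f
  induction f with
  | zero =>
    intro j i dp hf hij hjlo hQ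
    rw [pvDiagDown]
    constructor
    · intro x y hc
      rcases hc with hgt | ⟨hs, hlt⟩
      · exact hQ.1 x y (Or.inl hgt)
      · exact hQ.1 x y (Or.inr ⟨hs, by omega⟩)
    · intro x y hc
      rcases hc with hlt | ⟨hs, hge⟩
      · exact hQ.2 x y (Or.inl hlt)
      · by_cases hy : j ≤ y
        · exact hQ.2 x y (Or.inr ⟨hs, hy⟩)
        · rw [hQ.1 x y (Or.inr ⟨hs, by omega⟩)]
          exact (pvInit_eq_G_out board x y (by omega) (by omega)).symm
  | succ K ih =>
    intro j i dp hf hij hjlo hQ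
    have hjn : j < (board.length:Int) := by omega
    have hin : 0 ≤ i ∧ i < (board.length:Int) ∧ 0 ≤ j ∧ j < (board.length:Int) := by
      constructor; omega; constructor; omega; constructor; omega; omega
    have hnc : ¬(i = (board.length:Int)-1 ∧ j = (board.length:Int)-1) := by
      rintro ⟨h1, h2⟩; omega
    rw [pvDiagDown, if_pos hjn]
    by_cases hx : pvChA board i j = 'X'
    · rw [if_pos hx]
      have hG0 : pvG board i j = pvInit board i j := by
        rw [pvG_X board i j hin hnc hx, pvInit, if_neg hnc]
      exact ih (j+1) (i-1) dp (by omega) (by omega) (by omega) (pvQ_skip board dp s j i hij hG0 hQ)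
    · rw [if_neg hx]
      have e1 : dp (i+1) j = pvG board (i+1) j := hQ.1 _ _ (Or.inl (by omega))
      have e2 : dp i (j+1) = pvG board i (j+1) := hQ.1 _ _ (Or.inl (by omega))
      have e3 : dp (i+1) (j+1) = pvG board (i+1) (j+1) := hQ.1 _ _ (Or.inl (by omega))
      have h00 : ¬(i = 0 ∧ j = 0) := by rintro ⟨h1, h2⟩; omega
      have hG := pvG_step board i j hin hnc hx
      rw [if_neg h00] at hG
      simp only [pvFoldW, e1, e2, e3, ← hG]
      exact ih (j+1) (i-1) _ (by omega) (by omega) (by omega) (pvQ_write board dp s j i hij hQ)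

theorem pvDiagUp_spec (board : List String) (n : Int) (hn : n = (board.length : Int))
    (s : Int) (hs0 : 0 ≤ s) (hs1 : s ≤ n - 2) :
    ∀ (f : Nat) (j i : Int) dp, f = (i+1).toNat → i + j = s → 0 ≤ j → pvQ board dp s j →
      pvQ board (pvDiagUp board n f j i dp) s (s+1) := by
  subst hn
  intro f
  induction f with
  | zero =>
    intro j i dp hf hij hj0 hQ
    rw [pvDiagUp]
    constructor
    · intro x y hc
      rcases hc with hgt | ⟨hs, hlt⟩
      · exact hQ.1 x y (Or.inl hgt)
      · exact hQ.1 x y (Or.inr ⟨hs, by omega⟩)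
    · intro x y hc
      rcases hc with hlt | ⟨hs, hge⟩
      · exact hQ.2 x y (Or.inl hlt)
      · by_cases hy : j ≤ y
        · exact hQ.2 x y (Or.inr ⟨hs, hy⟩)
        · rw [hQ.1 x y (Or.inr ⟨hs, by omega⟩)]
          exact (pvInit_eq_G_out board x y (by omega) (by omega)).symm
  | succ K ih =>
    intro j i dp hf hij hj0 hQ
    have hi0 : 0 ≤ i := by omega
    have hin : 0 ≤ i ∧ i < (board.length:Int) ∧ 0 ≤ j ∧ j < (board.length:Int) := by
      constructor; omega; constructor; omega; constructor; omega; omega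
    have hnc : ¬(i = (board.length:Int)-1 ∧ j = (board.length:Int)-1) := by
      rintro ⟨h1, h2⟩; omega
    rw [pvDiagUp, if_pos hi0]
    by_cases hx : pvChA board i j = 'X'
    · rw [if_pos hx]
      have hG0 : pvG board i j = pvInit board i j := by
        rw [pvG_X board i j hin hnc hx, pvInit, if_neg hnc]
      exact ih (j+1) (i-1) dp (by omega) (by omega) (by omega) (pvQ_skip board dp s j i hij hG0 hQ)
    · rw [if_neg hx]
      have e1 : dp (i+1) j = pvG board (i+1) j := hQ.1 _ _ (Or.inl (by omega))
      have e2 : dp i (j+1) = pvG board i (j+1) := hQ.1 _ _ (Or.inl (by omega))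
      have e3 : dp (i+1) (j+1) = pvG board (i+1) (j+1) := hQ.1 _ _ (Or.inl (by omega))
      have hG := pvG_step board i j hin hnc hx
      simp only [pvFoldW, e1, e2, e3, ← hG]
      exact ih (j+1) (i-1) _ (by omega) (by omega) (by omega) (pvQ_write board dp s j i hij hQ)

theorem pvLoop1_spec (board : List String) (n : Int) (hn : n = (board.length : Int)) :
    ∀ (f : Nat) (j0 : Int) dp, f = (j0+1).toNat → -1 ≤ j0 → j0 ≤ n - 2 →
      pvP board dp (n + j0) → pvP board (pvLoop1 board n f j0 dp) (n - 1) := by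
  subst hn
  intro f
  induction f with
  | zero =>
    intro j0 dp hf hlo hhi hP
    rw [pvLoop1]
    have : j0 = -1 := by omega
    subst this
    rwa [show (board.length:Int) + -1 = (board.length:Int) - 1 from by ring] at hP
  | succ K ih =>
    intro j0 dp hf hlo hhi hP
    have hj0 : 0 ≤ j0 := by omega
    rw [pvLoop1, if_pos hj0]
    -- start-of-sweep invariant on diagonal s = n-1+j0
    have hQ0 : pvQ board dp ((board.length:Int) - 1 + j0) j0 := by
      constructor
      · intro x y hc
        rcases hc with hgt | ⟨hs, hlt⟩
        · exact hP.1 x y (by omega)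
        · rw [hP.2 x y (by omega)]
          exact pvInit_eq_G_out board x y (by omega) (by omega)
      · intro x y hc
        rcases hc with hlt | ⟨hs, hge⟩
        · exact hP.2 x y (by omega)
        · exact hP.2 x y (by omega)
    have hQn := pvDiagDown_spec board _ rfl ((board.length:Int) - 1 + j0) (by omega) (by omega)
      (((board.length:Int) - j0).toNat) j0 ((board.length:Int)-1) dp rfl (by omega) (by omega) hQ0
    -- end-of-sweep conversion to the between-sweeps invariant at s = n-1+j0
    have hP' : pvP board
        (pvDiagDown board (board.length:Int) (((board.length:Int) - j0).toNat) j0 ((board.length:Int)-1) dp)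
        ((board.length:Int) - 1 + j0) := by
      constructor
      · intro x y hge
        by_cases hgt : x + y > (board.length:Int) - 1 + j0
        · exact hQn.1 x y (Or.inl hgt)
        · by_cases hy : y < (board.length:Int)
          · exact hQn.1 x y (Or.inr ⟨by omega, hy⟩)
          · rw [hQn.2 x y (Or.inr ⟨by omega, by omega⟩)]
            exact pvInit_eq_G_out board x y (by omega) (by omega)
      · intro x y hlt
        exact hQn.2 x y (Or.inl hlt)
    exact ih (j0 - 1) _ (by omega) (by omega) (by omega)
      (by rwa [show (board.length:Int) + (j0 - 1) = (board.length:Int) - 1 + j0 from by ring])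

theorem pvLoop2_spec (board : List String) (n : Int) (hn : n = (board.length : Int)) :
    ∀ (f : Nat) (i0 : Int) dp, f = (i0+1).toNat → -1 ≤ i0 → i0 ≤ n - 2 →
      pvP board dp (i0 + 1) → pvP board (pvLoop2 board n f i0 dp) 0 := by
  subst hn
  intro f
  induction f with
  | zero =>
    intro i0 dp hf hlo hhi hP
    rw [pvLoop2]
    have : i0 = -1 := by omega
    subst this
    rwa [show (-1:Int) + 1 = 0 from by ring] at hP
  | succ K ih =>
    intro i0 dp hf hlo hhi hP
    have hi0 : 0 ≤ i0 := by omega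
    rw [pvLoop2, if_pos hi0]
    have hQ0 : pvQ board dp i0 0 := by
      constructor
      · intro x y hc
        rcases hc with hgt | ⟨hs, hlt⟩
        · exact hP.1 x y (by omega)
        · rw [hP.2 x y (by omega)]
          exact pvInit_eq_G_out board x y (by omega) (by omega)
      · intro x y hc
        rcases hc with hlt | ⟨hs, hge⟩
        · exact hP.2 x y (by omega)
        · exact hP.2 x y (by omega)
    have hQn := pvDiagUp_spec board _ rfl i0 (by omega) (by omega)
      ((i0+1).toNat) 0 i0 dp rfl (by omega) (by omega) hQ0
    have hP' : pvP board (pvDiagUp board (board.length:Int) ((i0+1).toNat) 0 i0 dp) i0 := by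
      constructor
      · intro x y hge
        by_cases hgt : x + y > i0
        · exact hQn.1 x y (Or.inl hgt)
        · by_cases hy : y < i0 + 1
          · exact hQn.1 x y (Or.inr ⟨by omega, hy⟩)
          · rw [hQn.2 x y (Or.inr ⟨by omega, by omega⟩)]
            exact pvInit_eq_G_out board x y (by omega) (by omega)
      · intro x y hlt
        exact hQn.2 x y (Or.inl hlt)
    exact ih (i0 - 1) _ (by omega) (by omega) (by omega)
      (by rwa [show i0 - 1 + 1 = i0 from by ring])

theorem pathsWithMaxScore_eq_G (board : List String) (h : board ≠ []) :
    pathsWithMaxScore board = [(pvG board 0 0).1, (pvG board 0 0).2] := by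
  have hn : 1 ≤ (board.length : Int) := by
    have := List.length_pos_iff.mpr h; omega
  have hk : PySem.Int.mod ((board.length:Int)-1) ((board.length:Int)+1) = (board.length:Int)-1 := by
    rw [PySem.Int.mod_eq_emod_of_pos (by omega)]
    exact Int.emod_eq_of_lt (by omega) (by omega)
  have hP1 : pvP board
      (pvSetA (fun _ _ => (0, 0)) ((board.length:Int)-1) ((board.length:Int)-1) (0, 1))
      (2*(board.length:Int) - 2) := by
    constructor
    · intro x y hge
      by_cases hxy : x = (board.length:Int)-1 ∧ y = (board.length:Int)-1
      · obtain ⟨rfl, rfl⟩ := hxy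
        rw [pvSetA, if_pos ⟨rfl, rfl⟩, pvG_corner board hn]
      · rw [pvSetA, if_neg hxy, pvG_out board x y (by omega)]
    · intro x y hlt
      have hxy : ¬(x = (board.length:Int)-1 ∧ y = (board.length:Int)-1) := by
        rintro ⟨rfl, rfl⟩; omega
      rw [pvSetA, if_neg hxy, pvInit, if_neg hxy]
  have hP2 := pvLoop1_spec board _ rfl (((board.length:Int)-1).toNat) ((board.length:Int)-2) _
    (by omega) (by omega) (by omega)
    (by rw [show (board.length:Int) + ((board.length:Int)-2) = 2*(board.length:Int) - 2 from by ring]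
        exact hP1)
  have hP3 := pvLoop2_spec board _ rfl (((board.length:Int)-1).toNat) ((board.length:Int)-2) _
    (by omega) (by omega) (by omega)
    (by rw [show (board.length:Int) - 2 + 1 = (board.length:Int) - 1 from by ring]
        exact hP2)
  have hfin := hP3.1 0 0 (by omega)
  unfold pathsWithMaxScore
  simp only [hk]
  rw [hfin]

theorem pathsWithMaxScore_alt_eq_G (board : List String) :
    pathsWithMaxScore_alt board = [(pvG board 0 0).1, (pvG board 0 0).2] := by
  unfold pathsWithMaxScore_alt pvG
  rw [pvDpB_fuel board (2 * board.length + 1) ((2*(board.length:Int) - 0 - 0).toNat + 1) 0 0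
    (by omega) (by omega)]

theorem pathsWithMaxScore_nil : pathsWithMaxScore [] = [0, 1] := by
  unfold pathsWithMaxScore
  simp only [List.length_nil, Nat.cast_zero]
  norm_num [pvLoop1, pvLoop2, pvSetA]
  decide

theorem pathsWithMaxScore_alt_nil : pathsWithMaxScore_alt [] = [0, 0] := by
  decide

-- ===== VERDICT (by name: the statement is the Claim_ definition above) =====
theorem pathsWithMaxScore_spec : Claim_unchanged_pathsWithMaxScore := by
  intro board _ _ hD
  have hne : board ≠ [] := fun hh => hD hh
  rw [pathsWithMaxScore_eq_G board hne, pathsWithMaxScore_alt_eq_G board]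

theorem pathsWithMaxScore_changed : Claim_changed_pathsWithMaxScore := by
  unfold Claim_changed_pathsWithMaxScore
  refine ⟨by decide, by decide, rfl, pathsWithMaxScore_nil, pathsWithMaxScore_alt_nil, by decide⟩

theorem pathsWithMaxScore_tight : Claim_exact_pathsWithMaxScore := by
  intro board _ _ hD
  unfold D_pathsWithMaxScore at hD
  subst hD
  rw [pathsWithMaxScore_nil, pathsWithMaxScore_alt_nil]
  decide
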